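-- pv_equiv track=rewrite | github.com/SEONMl/Solutions | venv/Category/Challenge/2022KakaoMobility/N2.py | solution
-- ===== SOURCE A (Python) =====
-- def solution(id_list, k):
--     days=len(id_list)
--     # 1_000 * 5_000
--     coupon={}
--     totalCoupons=0
--     for day in range(days):
--         idOfDay=set(id_list[day].split())
--         for id in idOfDay:
--             value=coupon.setdefault(id,0)
--             if(value>=k):
--                 continue
--             else:
--                 coupon[id]=value+1
--                 totalCoupons+=1
--
--     return totalCoupons
-- ===== SOURCE B (Python) =====
-- def solution(id_list, k):
--     # sort the flattened (per-day deduplicated) id stream, then scan runs: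
--     # each run of equal ids has length = number of days that id appears; cap each run at k
--     tokens = sorted(t for day in id_list for t in set(day.split()))
--     cap = max(k, 0)
--     total = 0
--     run = 0
--     prev = None
--     for t in tokens:
--         if t != prev:
--             total += min(run, cap)
--             run = 0
--             prev = t
--         run += 1
--     return total + min(run, cap)
-- ===== Notes on version B (the rewrite author's own statement) =====
-- stated objective: alternative
-- what changed: Replaces A's fused dict-based cap-while-counting loop (setdefault + in-loop cap check + running total) with sort-then-scan: flatten the per-day deduplicated id stream, sort it, and in one linear scan sum each run length capped at max(k,0); no dictionary at all.
import Mathlib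
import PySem

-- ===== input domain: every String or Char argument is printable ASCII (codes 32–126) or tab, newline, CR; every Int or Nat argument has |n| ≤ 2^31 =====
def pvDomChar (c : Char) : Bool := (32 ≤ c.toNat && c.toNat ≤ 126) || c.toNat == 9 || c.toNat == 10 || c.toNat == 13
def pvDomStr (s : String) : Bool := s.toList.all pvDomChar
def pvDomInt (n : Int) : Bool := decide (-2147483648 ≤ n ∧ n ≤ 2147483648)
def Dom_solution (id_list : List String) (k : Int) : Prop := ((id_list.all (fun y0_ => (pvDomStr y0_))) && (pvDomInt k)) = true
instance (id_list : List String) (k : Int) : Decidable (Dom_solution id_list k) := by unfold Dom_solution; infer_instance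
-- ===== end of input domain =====

-- B replaces A's fused dict-based cap-while-counting loop with sort-then-scan: flatten the
-- per-day deduplicated id stream, sort it, and sum each run's length capped at max(k,0).
-- Alternative decomposition, no dict; same task, similar cost.

-- ===== PORT A =====
-- body of A's inner 'for id in idOfDay' loop
def stepA (k : Int) (st : PySem.Dict String Int × Int) (id : String) :
    PySem.Dict String Int × Int :=
  let coupon := st.1.setdefault id 0
  let value := coupon.getD id 0
  if value ≥ k then (coupon, st.2)
  else (coupon.insert id (value + 1), st.2 + 1)

def solution (id_list : List String) (k : Int) : Int :=
  let days := (id_list.length : Int)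
  (List.foldl
    (fun st day =>
      (PySem.Set.ofList (PySem.Str.split₀ (PySem.List.pyGetD id_list day ""))).foldl (stepA k) st)
    (PySem.Dict.empty, 0) (PySem.List.pyRange 0 days 1)).2

-- ===== PORT B =====
-- body of B's 'for t in tokens' loop: state (total, run, prev)
def stepB (cap : Int) (st : Int × Int × Option String) (t : String) :
    Int × Int × Option String :=
  let st' := if some t ≠ st.2.2 then (st.1 + min st.2.1 cap, (0 : Int), some t) else st
  (st'.1, st'.2.1 + 1, st'.2.2)

def solution_alt (id_list : List String) (k : Int) : Int :=
  let tokens := PySem.List.sorted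
    (id_list.flatMap (fun day => PySem.Set.ofList (PySem.Str.split₀ day))) (fun x => x) false
  let cap := max k 0
  let st := tokens.foldl (stepB cap) (0, 0, none)
  st.1 + min st.2.1 cap

-- ===== PRECONDITION & SPEC =====
def Spec_solution (id_list : List String) (k : Int) (out : Int) : Prop := out = solution_alt id_list k
instance (id_list : List String) (k : Int) (out : Int) : Decidable (Spec_solution id_list k out) := by unfold Spec_solution; infer_instance

-- ===== CLAIM (what is proved, stated in full; the proofs are below) =====
def Claim_equal_solution : Prop := ∀ (id_list : List String) (k : Int), Dom_solution id_list k → Spec_solution id_list k (solution id_list k)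

-- ===== LEMMAS AND PROOFS =====

-- capped sum over the distinct elements: the value both programs compute
def cappedSum (cap : Int) (L : List String) : Int :=
  ∑ x ∈ L.toFinset, min ((List.count x L : Int)) cap

-- recursive form of B's scan (total threaded out)
def scanB (cap : Int) : Option String → Int → List String → Int
  | _, run, [] => min run cap
  | prev, run, t :: L =>
      if some t ≠ prev then min run cap + scanB cap (some t) 1 L
      else scanB cap prev (run + 1) L

-- a nested 'for day: for id in g(day): step' loop is one loop over the flattened id stream
lemma foldl_inner_flatMap {σ : Type} (g : String → List String) (f : σ → String → σ)
    (l : List String) (init : σ) :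
    l.foldl (fun s a => (g a).foldl f s) init = (l.flatMap g).foldl f init := by
  induction l generalizing init with
  | nil => rfl
  | cons a l ih => simp [List.flatMap_cons, List.foldl_append, ih]

-- updating one term of a sum over a duplicate-free index list
lemma sum_map_shift (x : String) (S : List String) (f g : String → Int)
    (hn : S.Nodup) (hx : x ∈ S) (h : ∀ y ∈ S, y ≠ x → g y = f y) :
    (S.map g).sum = (S.map f).sum + (g x - f x) := by
  induction S with
  | nil => cases hx
  | cons a S ih =>
    rcases List.mem_cons.mp hx with rfl | hx'
    · have hrest : ∀ y ∈ S, g y = f y := by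
        intro y hy
        exact h y (List.mem_cons_of_mem _ hy)
          (fun hyx => (List.nodup_cons.mp hn).1 (hyx ▸ hy))
      simp only [List.map_cons, List.sum_cons, List.map_congr_left hrest]
      ring
    · have hax : a ≠ x := fun hax => (List.nodup_cons.mp hn).1 (hax ▸ hx')
      have ha : g a = f a := h a (by simp) hax
      have hih := ih (List.nodup_cons.mp hn).2 hx'
        (fun y hy hyx => h y (List.mem_cons_of_mem _ hy) hyx)
      simp only [List.map_cons, List.sum_cons, hih, ha]
      ring

lemma count_append_self (L : List String) (x : String) :
    (List.count x (L ++ [x]) : Int) = (List.count x L : Int) + 1 := by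
  simp [List.count_append]

lemma count_append_ne (L : List String) (x id : String) (h : id ≠ x) :
    (List.count id (L ++ [x]) : Int) = (List.count id L : Int) := by
  have h0 : List.count id [x] = 0 := List.count_eq_zero.mpr (by simp [h])
  simp [List.count_append, h0]

lemma ofList_append_singleton (L : List String) (x : String) :
    PySem.Set.ofList (L ++ [x]) = PySem.Set.add (PySem.Set.ofList L) x := by
  simp [PySem.Set.ofList_eq_foldl, List.foldl_append]

-- invariant of A's fused loop: coupon[id] = min(count, max(k,0)) and the running total is
-- the capped sum over the ids seen so far
lemma A_inv (k : Int) (L : List String) :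
    (∀ id : String, (List.foldl (stepA k) (PySem.Dict.empty, 0) L).1.getD id 0
        = min ((List.count id L : Int)) (max k 0)) ∧
    (List.foldl (stepA k) (PySem.Dict.empty, 0) L).2
        = ((PySem.Set.ofList L).map (fun id => min ((List.count id L : Int)) (max k 0))).sum := by
  induction L using List.reverseRecOn with
  | nil =>
    constructor
    · intro id
      simp [PySem.Dict.empty, PySem.Dict.getD, PySem.Dict.get?]
    · simp [PySem.Set.ofList]
  | append_singleton L x ih =>
    obtain ⟨ihd, ihs⟩ := ih
    set st := List.foldl (stepA k) (PySem.Dict.empty, 0) L with hst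
    have hfold : List.foldl (stepA k) (PySem.Dict.empty, 0) (L ++ [x]) = stepA k st x := by
      simp [List.foldl_append, hst]
    have hsd : ∀ id : String, (st.1.setdefault x 0).getD id 0 = st.1.getD id 0 := by
      intro id
      by_cases h : id = x
      · subst h; simpa using PySem.Dict.getD_setdefault_self st.1 id 0 0
      · simp [PySem.Dict.getD, PySem.Dict.get?_setdefault_of_ne st.1 0 h]
    have hv : st.1.getD x 0 = min ((List.count x L : Int)) (max k 0) := ihd x
    have hc0 : (0 : Int) ≤ (List.count x L : Int) := Int.natCast_nonneg _
    have hstep : stepA k st x =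
        if st.1.getD x 0 ≥ k then (st.1.setdefault x 0, st.2)
        else ((st.1.setdefault x 0).insert x (st.1.getD x 0 + 1), st.2 + 1) := by
      simp only [stepA, hsd x]
    by_cases hvk : st.1.getD x 0 ≥ k
    · -- cap already reached (or k ≤ 0): nothing changes
      rw [hfold, hstep, if_pos hvk]
      rw [hv] at hvk
      constructor
      · intro id
        by_cases h : id = x
        · subst h
          rw [hsd id, hv, count_append_self]
          omega
        · rw [hsd id, count_append_ne L x id h, ihd id]
      · rw [ihs, ofList_append_singleton]
        by_cases hmem : x ∈ PySem.Set.ofList L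
        · have hadd : PySem.Set.add (PySem.Set.ofList L) x = PySem.Set.ofList L := by
            simp [PySem.Set.add, hmem]
          rw [hadd]
          apply Eq.symm
          apply congrArg
          apply List.map_congr_left
          intro id _
          show min ((List.count id (L ++ [x]) : Int)) (max k 0)
              = min ((List.count id L : Int)) (max k 0)
          by_cases h : id = x
          · subst h
            rw [count_append_self]
            omega
          · rw [count_append_ne L x id h]
        · have hadd : PySem.Set.add (PySem.Set.ofList L) x = PySem.Set.ofList L ++ [x] := by
            simp [PySem.Set.add, hmem]
          have hcx : (List.count x L : Int) = 0 := by
            have : x ∉ L := fun h => hmem ((PySem.Set.mem_ofList L x).mpr h)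
            simp [List.count_eq_zero_of_not_mem this]
          have hrest : (List.map (fun id => min ((List.count id (L ++ [x]) : Int)) (max k 0))
              (PySem.Set.ofList L)).sum
              = (List.map (fun id => min ((List.count id L : Int)) (max k 0))
              (PySem.Set.ofList L)).sum := by
            apply congrArg
            apply List.map_congr_left
            intro id hid
            have h : id ≠ x := fun h => hmem (h ▸ hid)
            show min ((List.count id (L ++ [x]) : Int)) (max k 0)
                = min ((List.count id L : Int)) (max k 0)
            rw [count_append_ne L x id h]
          have hlast : (List.map (fun id => min ((List.count id (L ++ [x]) : Int)) (max k 0))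
              [x]).sum = 0 := by
            simp only [List.map_cons, List.map_nil, List.sum_cons, List.sum_nil, add_zero]
            show min ((List.count x (L ++ [x]) : Int)) (max k 0) = 0
            rw [count_append_self]
            omega
          rw [hadd, List.map_append, List.sum_append, hrest, hlast]
          omega
    · -- below the cap: coupon[x] and the total both increase by 1
      rw [hfold, hstep, if_neg hvk]
      have hklt : k > st.1.getD x 0 := lt_of_not_ge hvk
      rw [hv] at hklt
      constructor
      · intro id
        by_cases h : id = x
        · subst h
          rw [PySem.Dict.getD_insert_self, hv, count_append_self]
          omega
        · rw [PySem.Dict.getD_insert_of_ne _ _ _ h, hsd id, ihd id,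
            count_append_ne L x id h]
      · rw [ihs, ofList_append_singleton]
        by_cases hmem : x ∈ PySem.Set.ofList L
        · have hadd : PySem.Set.add (PySem.Set.ofList L) x = PySem.Set.ofList L := by
            simp [PySem.Set.add, hmem]
          rw [hadd]
          rw [sum_map_shift x (PySem.Set.ofList L)
            (fun id => min ((List.count id L : Int)) (max k 0))
            (fun id => min ((List.count id (L ++ [x]) : Int)) (max k 0))
            (PySem.Set.nodup_ofList L) hmem
            (by
              intro y _ hyx
              show min ((List.count y (L ++ [x]) : Int)) (max k 0)
                  = min ((List.count y L : Int)) (max k 0)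
              rw [count_append_ne L x y hyx])]
          dsimp only
          congr 1
          show (1 : Int) = min ((List.count x (L ++ [x]) : Int)) (max k 0)
              - min ((List.count x L : Int)) (max k 0)
          rw [count_append_self]
          omega
        · have hadd : PySem.Set.add (PySem.Set.ofList L) x = PySem.Set.ofList L ++ [x] := by
            simp [PySem.Set.add, hmem]
          have hcx : (List.count x L : Int) = 0 := by
            have : x ∉ L := fun h => hmem ((PySem.Set.mem_ofList L x).mpr h)
            simp [List.count_eq_zero_of_not_mem this]
          have hrest : (List.map (fun id => min ((List.count id (L ++ [x]) : Int)) (max k 0))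
              (PySem.Set.ofList L)).sum
              = (List.map (fun id => min ((List.count id L : Int)) (max k 0))
              (PySem.Set.ofList L)).sum := by
            apply congrArg
            apply List.map_congr_left
            intro id hid
            have h : id ≠ x := fun h => hmem (h ▸ hid)
            show min ((List.count id (L ++ [x]) : Int)) (max k 0)
                = min ((List.count id L : Int)) (max k 0)
            rw [count_append_ne L x id h]
          have hlast : (List.map (fun id => min ((List.count id (L ++ [x]) : Int)) (max k 0))
              [x]).sum = 1 := by
            simp only [List.map_cons, List.map_nil, List.sum_cons, List.sum_nil, add_zero]
            show min ((List.count x (L ++ [x]) : Int)) (max k 0) = 1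
            rw [count_append_self, hcx]
            omega
          rw [hadd, List.map_append, List.sum_append, hrest, hlast]

-- A's running total (a sum over the duplicate-free insertion-ordered list) is cappedSum
lemma setSum_eq_cappedSum (cap : Int) (L : List String) :
    ((PySem.Set.ofList L).map (fun id => min ((List.count id L : Int)) cap)).sum
      = cappedSum cap L := by
  have hfin : (PySem.Set.ofList L).toFinset = L.toFinset := by
    ext x; simp [List.mem_toFinset, PySem.Set.mem_ofList]
  unfold cappedSum
  rw [← hfin, ← List.sum_toFinset _ (PySem.Set.nodup_ofList L)]

-- B's foldl scan equals the recursive scan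
lemma foldl_stepB_eq_scanB (cap : Int) (L : List String) :
    ∀ (total run : Int) (prev : Option String),
      (List.foldl (stepB cap) (total, run, prev) L).1
        + min (List.foldl (stepB cap) (total, run, prev) L).2.1 cap
      = total + scanB cap prev run L := by
  induction L with
  | nil => intro total run prev; simp [scanB]
  | cons t L ih =>
    intro total run prev
    rw [List.foldl_cons]
    by_cases h : some t = prev
    · rw [show stepB cap (total, run, prev) t = (total, run + 1, prev) by simp [stepB, h],
        ih, show scanB cap prev run (t :: L) = scanB cap prev (run + 1) L by simp [scanB, h]]
    · rw [show stepB cap (total, run, prev) t = (total + min run cap, 1, some t) by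
          simp [stepB, h],
        ih, show scanB cap prev run (t :: L) = min run cap + scanB cap (some t) 1 L by
          simp [scanB, h]]
      ring

-- count/toFinset bookkeeping when peeling the head of a list
lemma cappedSum_cons (cap : Int) (t : String) (L : List String) :
    cappedSum cap (t :: L)
      = min ((List.count t L : Int) + 1) cap
          + ∑ x ∈ L.toFinset.erase t, min ((List.count x L : Int)) cap := by
  unfold cappedSum
  rw [List.toFinset_cons,
    ← Finset.sum_erase_add _ _ (Finset.mem_insert_self t L.toFinset),
    Finset.erase_insert_eq_erase]
  have hs : ∑ x ∈ L.toFinset.erase t, min ((List.count x (t :: L) : Int)) cap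
      = ∑ x ∈ L.toFinset.erase t, min ((List.count x L : Int)) cap :=
    Finset.sum_congr rfl (fun x hx => by
      have hxt : x ≠ t := Finset.ne_of_mem_erase hx
      simp [Ne.symm hxt])
  rw [hs, List.count_cons_self]
  push_cast
  ring

lemma erase_head_sum (cap : Int) (t : String) (L : List String) :
    ∑ x ∈ (t :: L).toFinset.erase t, min ((List.count x (t :: L) : Int)) cap
      = ∑ x ∈ L.toFinset.erase t, min ((List.count x L : Int)) cap := by
  rw [List.toFinset_cons, Finset.erase_insert_eq_erase]
  exact Finset.sum_congr rfl (fun x hx => by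
    have hxt : x ≠ t := Finset.ne_of_mem_erase hx
    simp [Ne.symm hxt])

-- the scan of a sorted tail after head a: the run continues through a's copies (all at the
-- front), then each later group contributes its own capped run
lemma scanB_sorted (cap : Int) (L : List String) :
    ∀ (a : String) (run : Int), (a :: L).Pairwise (· ≤ ·) →
      scanB cap (some a) run L
        = min (run + (List.count a L : Int)) cap
            + ∑ x ∈ L.toFinset.erase a, min ((List.count x L : Int)) cap := by
  induction L with
  | nil => intro a run _; simp [scanB]
  | cons t L ih =>
    intro a run h
    have htl : (t :: L).Pairwise (· ≤ ·) := h.of_cons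
    by_cases hta : t = a
    · subst hta
      have hstep : scanB cap (some t) run (t :: L) = scanB cap (some t) (run + 1) L := by
        simp [scanB]
      have hsub : (t :: L).Sublist (t :: t :: L) :=
        List.Sublist.cons₂ t (List.sublist_cons_self t L)
      rw [hstep, ih t (run + 1) (h.sublist hsub), erase_head_sum,
        List.count_cons_self]
      push_cast
      ring_nf
    · have hat : a ≤ t := (List.pairwise_cons.mp h).1 t (by simp)
      have hnotin : a ∉ t :: L := by
        intro hmem
        rcases List.mem_cons.mp hmem with h1 | h2
        · exact hta h1.symm
        · exact hta (le_antisymm ((List.pairwise_cons.mp htl).1 a h2) hat)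
      have hstep : scanB cap (some a) run (t :: L)
          = min run cap + scanB cap (some t) 1 L := by
        simp [scanB, hta]
      rw [hstep, ih t 1 htl]
      have hca : (List.count a (t :: L) : Int) = 0 := by
        simp [List.count_eq_zero_of_not_mem hnotin]
      have herase : (t :: L).toFinset.erase a = (t :: L).toFinset :=
        Finset.erase_eq_of_notMem (by simpa [List.mem_toFinset] using hnotin)
      rw [hca, herase]
      have hsum : ∑ x ∈ (t :: L).toFinset, min ((List.count x (t :: L) : Int)) cap
          = min ((List.count t L : Int) + 1) cap
              + ∑ x ∈ L.toFinset.erase t, min ((List.count x L : Int)) cap := by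
        have := cappedSum_cons cap t L
        unfold cappedSum at this
        exact this
      rw [hsum]
      ring_nf

-- the full scan of a sorted list is the capped sum over its distinct elements
lemma scanB_sorted_full (cap : Int) (hcap : 0 ≤ cap) (L : List String)
    (h : L.Pairwise (· ≤ ·)) : scanB cap none 0 L = cappedSum cap L := by
  cases L with
  | nil => simp [scanB, cappedSum]; omega
  | cons t L =>
    have hstep : scanB cap none 0 (t :: L) = min 0 cap + scanB cap (some t) 1 L := by
      simp [scanB]
    rw [hstep, scanB_sorted cap L t 1 h, cappedSum_cons]
    have h0 : min (0 : Int) cap = 0 := by omega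
    rw [h0, show (1 : Int) + (List.count t L : Int) = (List.count t L : Int) + 1 by ring]
    ring

-- cappedSum only depends on the multiset of elements
lemma cappedSum_perm (cap : Int) (L M : List String) (h : L.Perm M) :
    cappedSum cap L = cappedSum cap M := by
  unfold cappedSum
  rw [List.toFinset_eq_of_perm L M h]
  exact Finset.sum_congr rfl (fun x _ => by rw [h.count_eq])

-- ===== VERDICT (by name: the statement is the Claim_ definition above) =====
theorem solution_spec : Claim_equal_solution := by
  intro id_list k _
  unfold Spec_solution
  set T := id_list.flatMap (fun s => PySem.Set.ofList (PySem.Str.split₀ s)) with hT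
  have hA : solution id_list k = (List.foldl (stepA k) (PySem.Dict.empty, 0) T).2 := by
    show (List.foldl
        (fun st day =>
          (PySem.Set.ofList (PySem.Str.split₀ (PySem.List.pyGetD id_list day ""))).foldl (stepA k) st)
        (PySem.Dict.empty, 0) (PySem.List.pyRange 0 (id_list.length : Int))).2 = _
    rw [PySem.List.foldl_pyRange_pyGetD' id_list ""
      (fun st s => (PySem.Set.ofList (PySem.Str.split₀ s)).foldl (stepA k) st)
      (PySem.Dict.empty, 0) (le_refl 0)]
    rw [foldl_inner_flatMap (fun s => PySem.Set.ofList (PySem.Str.split₀ s)) (stepA k)]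
    simp [hT]
  have hB : solution_alt id_list k
      = cappedSum (max k 0) (PySem.List.sorted T (fun x => x) false) := by
    show (List.foldl (stepB (max k 0)) (0, 0, none)
          (PySem.List.sorted T (fun x => x) false)).1
        + min (List.foldl (stepB (max k 0)) (0, 0, none)
          (PySem.List.sorted T (fun x => x) false)).2.1 (max k 0) = _
    rw [foldl_stepB_eq_scanB (max k 0) (PySem.List.sorted T (fun x => x) false) 0 0 none,
      scanB_sorted_full (max k 0) (le_max_right k 0) _
        (by simpa using PySem.List.sorted_pairwise T (fun x => x))]
    ring
  rw [hA, hB, (A_inv k T).2, setSum_eq_cappedSum,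
    cappedSum_perm (max k 0) T (PySem.List.sorted T (fun x => x) false)
      (PySem.List.sorted_perm T (fun x => x) false).symm]
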